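-- pv_equiv track=rewrite | github.com/cscenter/project_screenshots | src/screenshots/screenshot_filters/scrollbars_detector.py | check_if_horizontal
-- ===== SOURCE A (Python) =====
-- def horizontal_lines(lines, height, width):
--     horizontal = []
--     for line in lines:
--         for x1,y1,x2,y2 in line:
--             if abs(x2 - x1) >= width / 2 and y1 == y2 and y1 >= height / 5:
--                 # note the order of the appended elemnts
--                 horizontal.append((y1, x1, y2, x2))
--     return horizontal
--
-- def check_if_horizontal(lines, height, width):
--     lines = horizontal_lines(lines, height, width)
--     if (len(lines) < 2):
--         return False
--     lines.sort() # Should sort based on y1 first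
--     lines.reverse()
--     fy1, fx1, fy2, fx2 = lines[0]
--     for idx in range(len(lines)):
--         sy1, sx1, sy2, sx2 = lines[idx]
--         if (fy1 - sy1 > 3): # threshholding many lines on the same space
--             if (fy1 - sy1 < width / 5):
--                 return True
--             else:
--                 fy1, fx1, fy2, fx2 = sy1, sx1, sy2, sx2
--     return False
-- ===== SOURCE B (Python) =====
-- def check_if_horizontal(lines, height, width):
--     # horizontal candidates' y-coordinates (same filter as A)
--     ys = [y1 for line in lines for (x1, y1, x2, y2) in line
--           if abs(x2 - x1) >= width / 2 and y1 == y2 and y1 >= height / 5]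
--     if len(ys) < 2:
--         return False
--     # selection loop -- no sorting: repeatedly pick the largest y lying more
--     # than 3 below the current representative and test that gap against width/5
--     rep = max(ys)
--     rest = [y for y in ys if rep - y > 3]
--     while rest:
--         nxt = max(rest)
--         if rep - nxt < width / 5:
--             return True
--         rep = nxt
--         rest = [y for y in rest if rep - y > 3]
--     return False
-- ===== Notes on version B (the rewrite author's own statement) =====
-- stated objective: alternative
-- what changed: B replaces A's sort-then-reverse of 4-tuples and stateful early-return scan by a sort-free selection loop over the candidate y-coordinates: repeatedly take the maximum y more than 3 below the current representative and test that gap against width/5.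
import Mathlib
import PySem

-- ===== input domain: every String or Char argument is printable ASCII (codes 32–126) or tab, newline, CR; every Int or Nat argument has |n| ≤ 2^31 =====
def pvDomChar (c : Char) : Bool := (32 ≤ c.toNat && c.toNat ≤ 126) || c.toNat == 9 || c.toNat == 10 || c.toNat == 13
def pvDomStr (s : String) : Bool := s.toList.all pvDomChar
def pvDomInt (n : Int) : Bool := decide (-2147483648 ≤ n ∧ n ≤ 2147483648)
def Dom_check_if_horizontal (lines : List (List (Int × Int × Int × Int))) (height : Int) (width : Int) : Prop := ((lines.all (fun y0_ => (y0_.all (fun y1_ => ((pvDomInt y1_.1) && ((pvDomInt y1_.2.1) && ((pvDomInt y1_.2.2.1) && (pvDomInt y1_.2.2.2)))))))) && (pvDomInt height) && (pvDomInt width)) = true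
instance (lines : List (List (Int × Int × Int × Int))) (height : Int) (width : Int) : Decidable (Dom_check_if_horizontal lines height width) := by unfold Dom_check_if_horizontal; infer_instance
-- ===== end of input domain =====

-- B replaces A's sort of 4-tuples + stateful early-return scan by a sort-free selection loop
-- over the candidate y-coordinates (repeated max below the representative); objective: alternative.

-- ===== PORT A =====
-- candidate test; float comparisons 'abs(x2-x1) >= width/2' and 'y1 >= height/5' are exact on
-- ints as '2*|x2-x1| >= width' and '5*y1 >= height' (both Pythons use this same expression)
def hCond (height width : Int) (t : Int × Int × Int × Int) : Bool :=
  decide (2 * |t.2.2.1 - t.1| ≥ width) && (t.2.1 == t.2.2.2) && decide (5 * t.2.1 ≥ height)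

def horizontal_lines (lines : List (List (Int × Int × Int × Int))) (height width : Int) :
    List (Int × Int × Int × Int) :=
  lines.foldl (fun acc line =>
    line.foldl (fun acc t =>
      if hCond height width t then acc ++ [(t.2.1, t.1, t.2.2.2, t.2.2.1)] else acc) acc) []

-- Python's lexicographic ≤ on 4-tuples of ints (the order 'lines.sort()' uses)
def le4b (a b : Int × Int × Int × Int) : Bool :=
  a.1 < b.1 || (a.1 == b.1 && (a.2.1 < b.2.1 || (a.2.1 == b.2.1 &&
    (a.2.2.1 < b.2.2.1 || (a.2.2.1 == b.2.2.1 && a.2.2.2 ≤ b.2.2.2)))))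

-- the for-idx loop with the mutable representative fy1/... and early return True
def loopA (width : Int) (f : Int × Int × Int × Int) : List (Int × Int × Int × Int) → Bool
  | [] => false
  | s :: rest =>
    if f.1 - s.1 > 3 then
      (if 5 * (f.1 - s.1) < width then true else loopA width s rest)
    else loopA width f rest

def check_if_horizontal (lines : List (List (Int × Int × Int × Int))) (height : Int) (width : Int) : Bool :=
  let hs := horizontal_lines lines height width
  if hs.length < 2 then false
  else
    -- lines.sort(); lines.reverse()  (library sort; lex order on int 4-tuples is total, so the
    -- sorted list is unique and insertionSort is exact)
    let s := (List.insertionSort (fun a b => le4b a b = true) hs).reverse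
    loopA width s.headI s   -- lines[0] exists: length ≥ 2

-- ===== PORT B =====
-- max(l) for a nonempty list a :: t (Python's built-in max on ints)
def lmax (a : Int) (t : List Int) : Int := t.foldl max a

-- termination helper for loopB, cited by name in decreasing_by
theorem lmax_mem (a : Int) (t : List Int) : lmax a t ∈ a :: t := by
  induction t generalizing a with
  | nil => simp [lmax]
  | cons b t ih =>
    simp only [lmax, List.foldl_cons] at *
    rcases max_choice a b with hm | hm <;> rw [hm] <;>
      [rcases List.mem_cons.mp (ih a) with h | h; rcases List.mem_cons.mp (ih b) with h | h] <;>
      simp [h]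

-- the while loop: rest nonempty → pick nxt = max(rest), test gap, else recurse on the filtered rest
def loopB (width rep : Int) (rest : List Int) : Bool :=
  match rest with
  | [] => false
  | a :: t =>
    let nxt := lmax a t
    if 5 * (rep - nxt) < width then true
    else loopB width nxt ((a :: t).filter (fun y => decide (nxt - y > 3)))
termination_by rest.length
decreasing_by
  have hm := lmax_mem a t
  have : ¬ (decide (lmax a t - lmax a t > 3) = true) := by simp
  simpa using List.length_filter_lt_length_iff_exists.mpr ⟨lmax a t, hm, this⟩

def check_if_horizontal_alt (lines : List (List (Int × Int × Int × Int))) (height : Int) (width : Int) : Bool :=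
  let ys := lines.flatMap (fun line => (line.filter (hCond height width)).map (fun t => t.2.1))
  if ys.length < 2 then false
  else
    match ys with
    | [] => false   -- unreachable: length ≥ 2
    | a :: t =>
      let rep := lmax a t
      loopB width rep ((a :: t).filter (fun y => decide (rep - y > 3)))

-- ===== PRECONDITION & SPEC =====
def Spec_check_if_horizontal (lines : List (List (Int × Int × Int × Int))) (height : Int) (width : Int) (out : Bool) : Prop := out = check_if_horizontal_alt lines height width
instance (lines : List (List (Int × Int × Int × Int))) (height : Int) (width : Int) (out : Bool) : Decidable (Spec_check_if_horizontal lines height width out) := by unfold Spec_check_if_horizontal; infer_instance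

-- ===== CLAIM (what is proved, stated in full; the proofs are below) =====
def Claim_equal_check_if_horizontal : Prop := ∀ (lines : List (List (Int × Int × Int × Int))) (height : Int) (width : Int), Dom_check_if_horizontal lines height width → Spec_check_if_horizontal lines height width (check_if_horizontal lines height width)

-- ===== LEMMAS AND PROOFS =====

theorem lmax_ge (a : Int) (t : List Int) : ∀ x ∈ a :: t, x ≤ lmax a t := by
  induction t generalizing a with
  | nil => intro x hx; simp at hx; simp [lmax, hx]
  | cons b t ih =>
    intro x hx
    simp only [lmax, List.foldl_cons] at *
    have hmab : max a b ≤ t.foldl max (max a b) :=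
      ih (max a b) (max a b) List.mem_cons_self
    rcases List.mem_cons.mp hx with h | h
    · exact le_trans (le_of_eq h) (le_trans (le_max_left a b) hmab)
    · rcases List.mem_cons.mp h with h | h
      · exact le_trans (le_of_eq h) (le_trans (le_max_right a b) hmab)
      · exact ih (max a b) x (List.mem_cons.mpr (Or.inr h))

theorem lmax_eq_left (a : Int) (t : List Int) (h : ∀ x ∈ t, x ≤ a) : lmax a t = a := by
  have h1 := lmax_mem a t
  have h2 := lmax_ge a t a List.mem_cons_self
  rcases List.mem_cons.mp h1 with h1 | h1
  · exact h1
  · exact le_antisymm (h _ h1) h2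

theorem lmax_eq_of_perm (a b : Int) (t u : List Int) (h : (a :: t).Perm (b :: u)) :
    lmax a t = lmax b u := by
  apply le_antisymm
  · exact lmax_ge b u _ (h.mem_iff.mp (lmax_mem a t))
  · exact lmax_ge a t _ (h.symm.mem_iff.mp (lmax_mem b u))

-- loopB depends on its list argument only through multiset contents
theorem loopB_perm (w : Int) : ∀ (n : ℕ) (r₁ r₂ : List Int) (rep : Int), r₁.length ≤ n →
    r₁.Perm r₂ → loopB w rep r₁ = loopB w rep r₂ := by
  intro n
  induction n with
  | zero =>
    intro r₁ r₂ rep hn hp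
    have : r₁ = [] := List.length_eq_zero_iff.mp (Nat.le_zero.mp hn)
    subst this
    rw [hp.symm.eq_nil]
  | succ n ih =>
    intro r₁ r₂ rep hn hp
    cases r₁ with
    | nil => rw [hp.symm.eq_nil]
    | cons a t =>
      cases r₂ with
      | nil => exact absurd hp.eq_nil (by simp)
      | cons b u =>
        have hmax : lmax a t = lmax b u := lmax_eq_of_perm a b t u hp
        rw [loopB, loopB]
        simp only [hmax]
        split_ifs with hgap
        · rfl
        · apply ih
          · have hlt : ((a :: t).filter (fun y => decide (lmax b u - y > 3))).length
                < (a :: t).length := by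
              refine List.length_filter_lt_length_iff_exists.mpr ⟨lmax a t, lmax_mem a t, ?_⟩
              simp [hmax]
            have := hn
            simp only [List.length_cons] at this hlt
            omega
          · exact hp.filter _

-- A's loop, restricted to the y-coordinates it actually reads
def loopY (w f : Int) : List Int → Bool
  | [] => false
  | s :: rest =>
    if f - s > 3 then (if 5 * (f - s) < w then true else loopY w s rest)
    else loopY w f rest

theorem loopA_eq_loopY (w : Int) : ∀ (s : List (Int × Int × Int × Int)) (f : Int × Int × Int × Int),
    loopA w f s = loopY w f.1 (s.map (·.1)) := by
  intro s
  induction s with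
  | nil => intro f; rfl
  | cons a t ih =>
    intro f
    simp only [loopA, loopY, List.map_cons]
    split_ifs <;> simp [ih]

theorem filter_subsume (p q : Int → Bool) (h : ∀ y, q y = true → p y = true) :
    ∀ l : List Int, (l.filter p).filter q = l.filter q := by
  intro l
  induction l with
  | nil => rfl
  | cons a t ih =>
    by_cases hq : q a
    · have hp := h a hq
      simp [hp, hq, ih]
    · by_cases hp : p a <;> simp [hp, hq, ih]

-- the correspondence on a descending list: A's anchored scan = B's selection loop
theorem loopY_eq_loopB (w : Int) : ∀ (l : List Int) (rep : Int),
    l.Pairwise (fun a b => b ≤ a) →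
    loopY w rep l = loopB w rep (l.filter (fun y => decide (rep - y > 3))) := by
  intro l
  induction l with
  | nil => intro rep _; simp [loopY, loopB]
  | cons s t ih =>
    intro rep hpw
    have hpw' := (List.pairwise_cons.mp hpw).2
    have hts := (List.pairwise_cons.mp hpw).1
    simp only [loopY, List.filter_cons]
    by_cases hgap : rep - s > 3
    · simp only [hgap, decide_true, if_true]
      rw [loopB]
      have hmax : lmax s (t.filter (fun y => decide (rep - y > 3))) = s := by
        apply lmax_eq_left
        intro x hx
        exact hts x (List.mem_of_mem_filter hx)
      simp only [hmax]
      split_ifs with h5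
      · rfl
      · rw [show (s :: t.filter (fun y => decide (rep - y > 3))).filter
              (fun y => decide (s - y > 3))
            = (t.filter (fun y => decide (rep - y > 3))).filter (fun y => decide (s - y > 3))
          from by simp]
        rw [filter_subsume (fun y => decide (rep - y > 3)) (fun y => decide (s - y > 3))
          (by intro y hy; simp at hy ⊢; omega)]
        exact ih s hpw'
    · simp only [hgap, decide_false, if_false]
      exact ih rep hpw'

-- horizontal_lines as a flatMap of filtered, transformed segments
theorem inner_fold (height width : Int) : ∀ (line : List (Int × Int × Int × Int)) (acc : List (Int × Int × Int × Int)),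
    line.foldl (fun acc t => if hCond height width t then acc ++ [(t.2.1, t.1, t.2.2.2, t.2.2.1)] else acc) acc
      = acc ++ (line.filter (hCond height width)).map (fun t => (t.2.1, t.1, t.2.2.2, t.2.2.1)) := by
  intro line
  induction line with
  | nil => intro acc; simp
  | cons a t ih =>
    intro acc
    simp only [List.foldl_cons, List.filter_cons]
    by_cases h : hCond height width a
    · simp [h, ih]
    · simp [h, ih]

theorem outer_fold (height width : Int) : ∀ (lines : List (List (Int × Int × Int × Int))) (acc : List (Int × Int × Int × Int)),
    lines.foldl (fun acc line =>
        line.foldl (fun acc t => if hCond height width t then acc ++ [(t.2.1, t.1, t.2.2.2, t.2.2.1)] else acc) acc) acc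
      = acc ++ lines.flatMap (fun line => (line.filter (hCond height width)).map (fun t => (t.2.1, t.1, t.2.2.2, t.2.2.1))) := by
  intro lines
  induction lines with
  | nil => intro acc; simp
  | cons line rest ih =>
    intro acc
    simp only [List.foldl_cons, List.flatMap_cons]
    rw [ih, inner_fold, List.append_assoc]

theorem map_fst_hl (lines : List (List (Int × Int × Int × Int))) (height width : Int) :
    (horizontal_lines lines height width).map (·.1)
      = lines.flatMap (fun line => (line.filter (hCond height width)).map (fun t => t.2.1)) := by
  unfold horizontal_lines
  rw [outer_fold]
  simp [List.map_flatMap, List.map_map, Function.comp_def]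

-- the sorted-and-reversed list of candidates, projected to y, is descending
theorem sorted_desc (hs : List (Int × Int × Int × Int)) :
    (((List.insertionSort (fun a b => le4b a b = true) hs).reverse).map (·.1)).Pairwise
      (fun a b : Int => b ≤ a) := by
  haveI : IsTrans (Int × Int × Int × Int) (fun a b => le4b a b = true) := by
    constructor; intro a b c; simp only [le4b, Bool.or_eq_true, Bool.and_eq_true,
      decide_eq_true_eq, beq_iff_eq]; omega
  haveI : Std.Total (fun a b : Int × Int × Int × Int => le4b a b = true) := by
    constructor; intro a b; simp only [le4b, Bool.or_eq_true, Bool.and_eq_true,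
      decide_eq_true_eq, beq_iff_eq]; omega
  have hsorted := List.pairwise_insertionSort (fun a b => le4b a b = true) hs
  have hp : ((List.insertionSort (fun a b => le4b a b = true) hs).map (·.1)).Pairwise
      (fun a b : Int => a ≤ b) := by
    rw [List.pairwise_map]
    apply hsorted.imp
    intro a b hab
    simp only [le4b, Bool.or_eq_true, Bool.and_eq_true, decide_eq_true_eq, beq_iff_eq] at hab
    omega
  rw [List.map_reverse]
  simpa [List.pairwise_reverse] using hp

-- ===== VERDICT (by name: the statement is the Claim_ definition above) =====
theorem check_if_horizontal_spec : Claim_equal_check_if_horizontal := by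
  intro lines height width _
  unfold Spec_check_if_horizontal check_if_horizontal check_if_horizontal_alt
  simp only []
  rw [← map_fst_hl lines height width]
  have hlen : ((horizontal_lines lines height width).map (·.1)).length
      = (horizontal_lines lines height width).length := by simp
  by_cases hsmall : (horizontal_lines lines height width).length < 2
  · rw [if_pos hsmall, if_pos (by rw [hlen]; exact hsmall)]
  · rw [if_neg hsmall, if_neg (by rw [hlen]; exact hsmall)]
    set hs := horizontal_lines lines height width with hhs
    -- the sorted/reversed list and its y-projection
    cases hcs : (List.insertionSort (fun a b => le4b a b = true) hs).reverse with
    | nil =>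
      exfalso
      have hp := (List.reverse_perm _).trans
        (List.perm_insertionSort (fun a b => le4b a b = true) hs)
      rw [hcs] at hp
      have := hp.length_eq
      simp at this
      omega
    | cons t0 ts =>
      -- ys (unsorted) is a permutation of the sorted y-list
      cases hys : hs.map (·.1) with
      | nil =>
        exfalso
        have hl0 : hs.length = 0 := by simpa using congrArg List.length hys
        omega
      | cons a t =>
        have hperm : (a :: t).Perm (t0.1 :: ts.map (·.1)) := by
          rw [← hys, show t0.1 :: ts.map (·.1) = ((t0 :: ts).map (·.1)) from rfl, ← hcs]
          exact List.Perm.map _ (((List.reverse_perm _).trans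
            (List.perm_insertionSort (fun a b => le4b a b = true) hs)).symm)
        have hdesc : ((t0.1 :: ts.map (·.1)) : List Int).Pairwise (fun a b => b ≤ a) := by
          have := sorted_desc hs
          rw [hcs] at this
          simpa using this
        simp only [List.headI_cons]
        rw [loopA_eq_loopY]
        simp only [List.map_cons]
        have hhead : ∀ x ∈ (t0.1 :: ts.map (·.1) : List Int), x ≤ t0.1 := by
          intro x hx
          rcases List.mem_cons.mp hx with h | h
          · exact le_of_eq h
          · exact (List.pairwise_cons.mp hdesc).1 x h
        have hrep : lmax a t = t0.1 := by
          apply le_antisymm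
          · exact hhead _ (hperm.mem_iff.mp (lmax_mem a t))
          · exact lmax_ge a t _ (hperm.symm.mem_iff.mp List.mem_cons_self)
        rw [loopY_eq_loopB width (t0.1 :: ts.map (·.1)) t0.1 hdesc, hrep]
        exact (loopB_perm width ((a :: t).filter (fun y => decide (t0.1 - y > 3))).length _ _ t0.1 le_rfl (hperm.filter (fun y => decide (t0.1 - y > 3)))).symm
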